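-- pv_equiv track=rewrite | github.com/gvrVictor/waferIC_classification | SVM_Kernel_th.py | find_bounding_points
-- ===== SOURCE A (Python) =====
-- def find_bounding_points(coord_x, coord_y, height):
--     wafer_edge_points = []
--     i = 0
--     row_cnt = 0
--     while(i < len(coord_y)-1):
--         i_temp = 0
--         while((coord_y[i] == coord_y[i + i_temp]) and (i < len(coord_y)-1) and (i + i_temp < len(coord_y)-1)):
--             i_temp = i_temp + 1
--
--         if (row_cnt%2==0):
--             index_min_of_row = i
--             index_max_of_row = i + i_temp - 1
--             left_rc_intersect = height[i]
--             right_rc_intersect = height[index_max_of_row]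
--
--             wafer_edge_points.append((index_min_of_row, index_max_of_row, coord_x[i],  coord_x[index_max_of_row], coord_y[i], left_rc_intersect, right_rc_intersect))
--         i = i + i_temp
--         row_cnt = row_cnt + 1
--     return wafer_edge_points
-- ===== SOURCE B (Python) =====
-- def find_bounding_points(coord_x, coord_y, height):
--     # Pass 1: split indices 0 .. len(coord_y)-2 into maximal runs of equal coord_y,
--     # kept as (start, end) spans.  (The loop bound len-1 means the last element is
--     # never part of any run, matching the original scan.)
--     spans = []
--     for i in range(len(coord_y) - 1):
--         if i > 0 and coord_y[i] == coord_y[i - 1]: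
--             s, _ = spans[-1]
--             spans[-1] = (s, i)
--         else:
--             spans.append((i, i))
--     # Pass 2: emit one edge-point tuple per even-indexed span.
--     out = []
--     for k, (s, e) in enumerate(spans):
--         if k % 2 == 0:
--             out.append((s, e, coord_x[s], coord_x[e], coord_y[s], height[s], height[e]))
--     return out
-- ===== Notes on version B (the rewrite author's own statement) =====
-- stated objective: alternative
-- what changed: Replaces A's nested while loops with jump-by-run-length index arithmetic by a two-pass decomposition: one forward scan over indices 0..len-2 building explicit (start,end) run spans of equal coord_y, then an enumerate pass emitting a tuple for each even-indexed span.
-- outside the precondition, e.g. on find_bounding_points([5], [1, 2, 2], [5]): A returns [(0, 0, 5, 5, 1, 5, 5)], B returns [(0, 0, 5, 5, 1, 5, 5)]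
import Mathlib
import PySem

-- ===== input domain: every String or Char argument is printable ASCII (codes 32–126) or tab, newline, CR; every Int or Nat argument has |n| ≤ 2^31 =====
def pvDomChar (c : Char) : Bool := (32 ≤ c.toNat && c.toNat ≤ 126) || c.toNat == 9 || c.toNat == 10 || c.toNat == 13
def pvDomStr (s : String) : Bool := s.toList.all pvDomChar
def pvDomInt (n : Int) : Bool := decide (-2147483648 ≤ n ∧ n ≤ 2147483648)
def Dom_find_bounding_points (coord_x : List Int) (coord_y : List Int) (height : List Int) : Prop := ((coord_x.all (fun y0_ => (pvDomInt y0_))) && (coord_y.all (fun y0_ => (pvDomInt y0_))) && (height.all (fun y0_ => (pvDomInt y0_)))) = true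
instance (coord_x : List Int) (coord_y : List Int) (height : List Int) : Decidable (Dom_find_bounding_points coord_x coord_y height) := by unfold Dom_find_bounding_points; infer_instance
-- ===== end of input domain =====

-- B replaces A's nested while loops with jump-by-run-length arithmetic by a two-pass
-- decomposition (build explicit run spans, then emit even-indexed spans); objective:
-- alternative structure, same O(n) cost.

-- ===== PORT A =====
-- Inner while loop of A, made total by a fuel argument (cy.length, always enough: the loop
-- performs at most len - 1 - (i + t) further steps).  List indexing is ported with getD:
-- every index this loop evaluates is a natural number ≤ len(coord_y) - 1 (in range), so
-- getD is exact there.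
def fbpInner (cy : List Int) (i : Nat) : Nat → Nat → Nat
  | 0, t => t
  | fuel + 1, t =>
      if cy.getD i 0 = cy.getD (i + t) 0 ∧ i < cy.length - 1 ∧ i + t < cy.length - 1 then
        fbpInner cy i fuel (t + 1)
      else t

-- Outer while loop of A: i the index, rc = row_cnt, acc the growing result list; fuel
-- cy.length is always enough (i strictly increases each iteration, stopping at len - 1).
-- getD indexing: under Pre_ every accessed index (≤ len(coord_y) - 2) is in range,
-- where Python's indexing is exact.
def fbpOuter (cx cy h : List Int) : Nat → Nat → Nat →
    List (Int × Int × Int × Int × Int × Int × Int) →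
    List (Int × Int × Int × Int × Int × Int × Int)
  | 0, _, _, acc => acc
  | fuel + 1, i, rc, acc =>
      if i < cy.length - 1 then
        let t := fbpInner cy i cy.length 0
        let acc' := if rc % 2 = 0 then
            acc ++ [((i : Int), ((i + t - 1 : Nat) : Int), cx.getD i 0, cx.getD (i + t - 1) 0,
                     cy.getD i 0, h.getD i 0, h.getD (i + t - 1) 0)]
          else acc
        fbpOuter cx cy h fuel (i + t) (rc + 1) acc'
      else acc

def find_bounding_points (coord_x : List Int) (coord_y : List Int) (height : List Int) :
    List (Int × Int × Int × Int × Int × Int × Int) :=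
  fbpOuter coord_x coord_y height coord_y.length 0 0 []

-- ===== PORT B =====
-- Loop body of Source B's pass 1, one step per index i of range(len-1): extend the last span or
-- open a new one.  Spans are kept head-first (head = last appended) and reversed at the end —
-- the transliteration of append / update-last on a Python list.  getD is exact: i < len - 1
-- and i - 1 is only read when 0 < i.
def fbpStep (cy : List Int) (spans : List (Nat × Nat)) (i : Nat) : List (Nat × Nat) :=
  if 0 < i ∧ cy.getD i 0 = cy.getD (i - 1) 0 then
    match spans with
    | (s, _) :: rest => (s, i) :: rest
    | [] => [(i, i)]          -- unreachable: spans is nonempty once 0 < i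
  else (i, i) :: spans

def fbpSpans (cy : List Int) : List (Nat × Nat) :=
  ((List.range (cy.length - 1)).foldl (fbpStep cy) []).reverse

-- Loop body of Source B's pass 2: emit a tuple for each even-indexed span.
def fbpEmitStep (cx cy h : List Int)
    (out : List (Int × Int × Int × Int × Int × Int × Int)) (ksp : Int × Nat × Nat) :
    List (Int × Int × Int × Int × Int × Int × Int) :=
  if ksp.1 % 2 = 0 then
    out ++ [((ksp.2.1 : Int), (ksp.2.2 : Int), cx.getD ksp.2.1 0, cx.getD ksp.2.2 0,
             cy.getD ksp.2.1 0, h.getD ksp.2.1 0, h.getD ksp.2.2 0)]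
  else out

def find_bounding_points_alt (coord_x : List Int) (coord_y : List Int) (height : List Int) :
    List (Int × Int × Int × Int × Int × Int × Int) :=
  (PySem.List.enumerate (fbpSpans coord_y) 0).foldl (fbpEmitStep coord_x coord_y height) []

-- ===== PRECONDITION & SPEC =====
-- Pre_ excludes inputs where coord_x or height is shorter than len(coord_y) - 1 (the largest
-- index the scan can touch plus one): there Python A can raise IndexError.  On some such
-- inputs A still returns (a too-short list is only ever indexed on even rows) — see the cite
-- in claim.json; B behaves identically there, Pre_ just restricts to the natural
-- parallel-array domain.
def Pre_find_bounding_points (coord_x : List Int) (coord_y : List Int) (height : List Int) : Prop :=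
  coord_y.length - 1 ≤ coord_x.length ∧ coord_y.length - 1 ≤ height.length
instance (coord_x : List Int) (coord_y : List Int) (height : List Int) : Decidable (Pre_find_bounding_points coord_x coord_y height) := by unfold Pre_find_bounding_points; infer_instance

def pvWitness_find_bounding_points : List Int × List Int × List Int :=
  ([1, 2, 3, 4, 5], [0, 0, 1, 1, 2], [7, 8, 9, 10, 11])

def Spec_find_bounding_points (coord_x : List Int) (coord_y : List Int) (height : List Int) (out : List (Int × Int × Int × Int × Int × Int × Int)) : Prop := out = find_bounding_points_alt coord_x coord_y height
instance (coord_x : List Int) (coord_y : List Int) (height : List Int) (out : List (Int × Int × Int × Int × Int × Int × Int)) : Decidable (Spec_find_bounding_points coord_x coord_y height out) := by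
  unfold Spec_find_bounding_points
  haveI : DecidableEq (Int × Int × Int × Int × Int × Int × Int) := fun x y => inferInstance
  infer_instance

-- ===== CLAIM (what is proved, stated in full; the proofs are below) =====
def Claim_equal_find_bounding_points : Prop := ∀ (coord_x : List Int) (coord_y : List Int) (height : List Int), Dom_find_bounding_points coord_x coord_y height → Pre_find_bounding_points coord_x coord_y height → Spec_find_bounding_points coord_x coord_y height (find_bounding_points coord_x coord_y height)

-- ===== LEMMAS AND PROOFS =====

-- the tuple both programs emit for a span (s, e)
def fbpTuple (cx cy h : List Int) (s e : Nat) : Int × Int × Int × Int × Int × Int × Int :=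
  ((s : Int), (e : Int), cx.getD s 0, cx.getD e 0, cy.getD s 0, h.getD s 0, h.getD e 0)

-- jump-style run decomposition of indices 0 .. len-2, mirroring A's outer loop step for step
def runsFrom (cy : List Int) : Nat → Nat → List (Nat × Nat)
  | 0, _ => []
  | fuel + 1, i =>
      if i < cy.length - 1 then
        (i, i + fbpInner cy i cy.length 0 - 1) :: runsFrom cy fuel (i + fbpInner cy i cy.length 0)
      else []

-- emit every even-positioned span, counting from rc
def emitFrom (cx cy h : List Int) (rs : List (Nat × Nat)) (rc : Nat) :
    List (Int × Int × Int × Int × Int × Int × Int) :=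
  match rs with
  | [] => []
  | (s, e) :: rest =>
      (if rc % 2 = 0 then [fbpTuple cx cy h s e] else []) ++ emitFrom cx cy h rest (rc + 1)

-- A's loop produces exactly the even-row emission over the run decomposition
theorem fbpOuter_eq_emit (cx cy h : List Int) :
    ∀ (fuel i rc : Nat) (acc : List (Int × Int × Int × Int × Int × Int × Int)),
      fbpOuter cx cy h fuel i rc acc = acc ++ emitFrom cx cy h (runsFrom cy fuel i) rc := by
  intro fuel
  induction fuel with
  | zero => intro i rc acc; rw [fbpOuter, runsFrom, emitFrom]; simp
  | succ fuel ih =>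
      intro i rc acc
      by_cases hi : i < cy.length - 1
      · rw [fbpOuter, runsFrom, if_pos hi, if_pos hi]
        rw [ih, emitFrom]
        unfold fbpTuple
        split_ifs <;> simp
      · rw [fbpOuter, runsFrom, if_neg hi, if_neg hi, emitFrom]
        simp

-- characterisation of the inner loop under sufficient fuel: run length bound, run equality,
-- and the stopping reason
theorem fbpInner_spec (cy : List Int) (i : Nat) (hi : i < cy.length - 1) :
    ∀ (fuel t : Nat), cy.length - 1 - (i + t) ≤ fuel →
      (∀ k, i ≤ k → k < i + t → cy.getD k 0 = cy.getD i 0) → i + t ≤ cy.length - 1 →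
      t ≤ fbpInner cy i fuel t ∧ i + fbpInner cy i fuel t ≤ cy.length - 1 ∧
      (∀ k, i ≤ k → k < i + fbpInner cy i fuel t → cy.getD k 0 = cy.getD i 0) ∧
      (i + fbpInner cy i fuel t = cy.length - 1 ∨
        cy.getD (i + fbpInner cy i fuel t) 0 ≠ cy.getD i 0) := by
  intro fuel
  induction fuel with
  | zero =>
      intro t hd hall hle
      rw [fbpInner]
      exact ⟨le_refl _, hle, hall, Or.inl (by omega)⟩
  | succ fuel ih =>
      intro t hd hall hle
      by_cases hc : cy.getD i 0 = cy.getD (i + t) 0 ∧ i < cy.length - 1 ∧ i + t < cy.length - 1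
      · rw [fbpInner, if_pos hc]
        have h2 := ih (t + 1) (by omega) (fun k hk hk2 => by
          rcases Nat.lt_or_ge k (i + t) with hlt | hge
          · exact hall k hk hlt
          · have : k = i + t := by omega
            subst this; exact hc.1.symm) (by omega)
        exact ⟨by omega, h2.2.1, h2.2.2.1, h2.2.2.2⟩
      · rw [fbpInner, if_neg hc]
        refine ⟨le_refl _, hle, hall, ?_⟩
        rcases Nat.lt_or_ge (i + t) (cy.length - 1) with hlt | hge
        · right; intro he; exact hc ⟨he.symm, hi, hlt⟩
        · left; omega

-- with full fuel the inner loop advances at least one index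
theorem fbpInner_pos (cy : List Int) (i : Nat) (hi : i < cy.length - 1) :
    1 ≤ fbpInner cy i cy.length 0 := by
  have hfuel : ∃ f, cy.length = f + 1 := ⟨cy.length - 1, by omega⟩
  obtain ⟨f, hf⟩ := hfuel
  rw [hf, fbpInner, if_pos ⟨rfl, hi, by omega⟩]
  have hspec := fbpInner_spec cy i hi f 1 (by omega)
    (fun k hk hk2 => by rw [show k = i from by omega]) (by omega)
  exact hspec.1

-- extending the top span over indices that all equal their predecessor
theorem foldl_extend (cy : List Int) (s : Nat) :
    ∀ (d j : Nat) (acc : List (Nat × Nat)),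
      (∀ k, j < k → k < j + 1 + d → 0 < k ∧ cy.getD k 0 = cy.getD (k - 1) 0) →
      (List.range' (j + 1) d).foldl (fbpStep cy) ((s, j) :: acc) = (s, j + d) :: acc := by
  intro d
  induction d with
  | zero => intro j acc _; simp
  | succ d ih =>
      intro j acc hall
      rw [List.range'_succ, List.foldl_cons]
      have h1 := hall (j + 1) (by omega) (by omega)
      have hstep : fbpStep cy ((s, j) :: acc) (j + 1) = (s, j + 1) :: acc := by
        unfold fbpStep
        rw [if_pos (by simpa using h1)]
      rw [hstep]
      have hrec := ih (j + 1) acc (fun k hk hk2 => hall k (by omega) (by omega))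
      rw [show j + 1 + d = j + (d + 1) from by omega] at hrec
      exact hrec

-- the incremental span fold computes the jump-style run decomposition
theorem foldl_spans_eq_runs (cy : List Int) :
    ∀ (fuel i : Nat) (acc : List (Nat × Nat)), cy.length - 1 - i ≤ fuel → i ≤ cy.length - 1 →
      (i = 0 ∨ cy.getD i 0 ≠ cy.getD (i - 1) 0) →
      (List.range' i (cy.length - 1 - i)).foldl (fbpStep cy) acc =
        (runsFrom cy fuel i).reverse ++ acc := by
  intro fuel
  induction fuel with
  | zero =>
      intro i acc hd hle _
      rw [show cy.length - 1 - i = 0 from by omega, runsFrom]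
      simp
  | succ fuel ih =>
      intro i acc hd hle hstart
      by_cases hi : i < cy.length - 1
      · have hspec := fbpInner_spec cy i hi cy.length 0 (by omega) (by omega) (by omega)
        set t := fbpInner cy i cy.length 0 with ht
        obtain ⟨_, h2, hall, hstop⟩ := hspec
        have h1 : 1 ≤ t := fbpInner_pos cy i hi
        -- split the range: [i] ++ (i+1 .. i+t-1) ++ (i+t .. len-2)
        have e1 := @List.range'_append i 1 (t - 1) 1
        have e2 := @List.range'_append i t (cy.length - 1 - (i + t)) 1
        simp only [one_mul] at e1 e2
        rw [show 1 + (t - 1) = t from by omega] at e1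
        have esplit : List.range' i (cy.length - 1 - i) =
            List.range' i 1 ++ List.range' (i + 1) (t - 1) ++
            List.range' (i + t) (cy.length - 1 - (i + t)) := by
          rw [e1, e2, show t + (cy.length - 1 - (i + t)) = cy.length - 1 - i from by omega]
        rw [esplit, List.foldl_append, List.foldl_append]
        -- index i opens a new span
        have hfirst : (List.range' i 1).foldl (fbpStep cy) acc = (i, i) :: acc := by
          rw [List.range'_one, List.foldl_cons, List.foldl_nil]
          unfold fbpStep
          rw [if_neg]
          rcases hstart with h0 | hne
          · subst h0; rintro ⟨hlt, -⟩; omega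
          · rintro ⟨-, hc⟩; exact hne hc
        rw [hfirst]
        -- indices i+1 .. i+t-1 extend it
        have hext := foldl_extend cy i (t - 1) i acc (fun k hk hk2 => by
          refine ⟨by omega, ?_⟩
          have ha := hall k (by omega) (by omega)
          have hb := hall (k - 1) (by omega) (by omega)
          rw [ha, hb])
        rw [hext]
        rw [runsFrom, if_pos hi, ← ht]
        by_cases hend : i + t = cy.length - 1
        · rw [show cy.length - 1 - (i + t) = 0 from by omega, List.range'_zero, List.foldl_nil]
          have hrn : runsFrom cy fuel (i + t) = [] := by
            cases fuel with
            | zero => rw [runsFrom]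
            | succ f => rw [runsFrom, if_neg (by omega)]
          rw [hrn]
          simp only [List.reverse_cons, List.reverse_nil, List.nil_append, List.cons_append]
          rw [show i + (t - 1) = i + t - 1 from by omega]
        · have hne : cy.getD (i + t) 0 ≠ cy.getD (i + t - 1) 0 := by
            rcases hstop with heq | hne'
            · exact absurd heq hend
            · intro hcontra
              apply hne'
              calc cy.getD (i + t) 0 = cy.getD (i + t - 1) 0 := hcontra
                _ = cy.getD i 0 := hall (i + t - 1) (by omega) (by omega)
          have hnext := ih (i + t) ((i, i + (t - 1)) :: acc) (by omega) (by omega)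
            (Or.inr hne)
          rw [hnext]
          simp only [List.reverse_cons, List.append_assoc, List.cons_append, List.nil_append]
          rw [show i + (t - 1) = i + t - 1 from by omega]
      · rw [show cy.length - 1 - i = 0 from by omega, runsFrom, if_neg hi]
        simp

theorem fbpSpans_eq_runsFrom (cy : List Int) : fbpSpans cy = runsFrom cy cy.length 0 := by
  unfold fbpSpans
  rw [List.range_eq_range']
  have h := foldl_spans_eq_runs cy cy.length 0 [] (by omega) (by omega) (Or.inl rfl)
  rw [show cy.length - 1 - 0 = cy.length - 1 from rfl] at h
  rw [h]
  simp

-- B's second pass equals even-row emission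
theorem foldl_enumerate_eq_emit (cx cy h : List Int) :
    ∀ (rs : List (Nat × Nat)) (k : Nat) (acc : List (Int × Int × Int × Int × Int × Int × Int)),
      (PySem.List.enumerate rs (k : Int)).foldl (fbpEmitStep cx cy h) acc =
        acc ++ emitFrom cx cy h rs k := by
  intro rs
  induction rs with
  | nil => intro k acc; simp [PySem.List.enumerate_nil, emitFrom]
  | cons sp rest ih =>
      intro k acc
      obtain ⟨s, e⟩ := sp
      rw [PySem.List.enumerate_cons, List.foldl_cons, emitFrom]
      have hk : ((k : Int) + 1) = ((k + 1 : Nat) : Int) := by push_cast; ring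
      rw [hk, ih (k + 1)]
      have hmod : ((k : Int) % 2 = 0) ↔ (k % 2 = 0) := by omega
      by_cases hp : k % 2 = 0
      · rw [fbpEmitStep, if_pos (hmod.mpr hp), if_pos hp]
        simp [fbpTuple]
      · rw [fbpEmitStep, if_neg (fun hc => hp (hmod.mp hc)), if_neg hp]
        simp

-- ===== VERDICT (by name: the statement is the Claim_ definition above) =====
theorem find_bounding_points_spec : Claim_equal_find_bounding_points := by
  intro cx cy h _ _
  unfold Spec_find_bounding_points find_bounding_points find_bounding_points_alt
  rw [fbpOuter_eq_emit cx cy h cy.length 0 0 [], fbpSpans_eq_runsFrom]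
  have he := foldl_enumerate_eq_emit cx cy h (runsFrom cy cy.length 0) 0 []
  simpa using he.symm
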